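-- pv_equiv track=rewrite | github.com/DilawarAhmad/PythonDSA | 2-8-minRemove.py | minRemove
-- ===== SOURCE A (Python) =====
-- def minRemove(arr1, arr2):
--     freq1 = {}
--     freq2 = {}
--     count =0
--     for num in arr1:
--         if num in freq1:
--             freq1[num] +=1
--         else:
--             freq1[num] = 1
--     for num in arr2:
--         if num in freq2:
--             freq2[num] +=1
--         else:
--             freq2[num] = 1
--     for num in freq1:
--         if num in freq2:
--             count += min(freq1[num],freq2[num])
--     return count
-- ===== SOURCE B (Python) =====
-- def minRemove(arr1, arr2):
--     s1 = sorted(arr1)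
--     s2 = sorted(arr2)
--     i = j = count = 0
--     while i < len(s1) and j < len(s2):
--         if s1[i] == s2[j]:
--             count += 1
--             i += 1
--             j += 1
--         elif s1[i] < s2[j]:
--             i += 1
--         else:
--             j += 1
--     return count
-- ===== Notes on version B (the rewrite author's own statement) =====
-- stated objective: alternative
-- what changed: Replaced the two frequency-dictionary builds and the key-intersection loop with sort-then-two-pointer merge: both arrays are sorted and a single linear merge counts matching elements.
import Mathlib
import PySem

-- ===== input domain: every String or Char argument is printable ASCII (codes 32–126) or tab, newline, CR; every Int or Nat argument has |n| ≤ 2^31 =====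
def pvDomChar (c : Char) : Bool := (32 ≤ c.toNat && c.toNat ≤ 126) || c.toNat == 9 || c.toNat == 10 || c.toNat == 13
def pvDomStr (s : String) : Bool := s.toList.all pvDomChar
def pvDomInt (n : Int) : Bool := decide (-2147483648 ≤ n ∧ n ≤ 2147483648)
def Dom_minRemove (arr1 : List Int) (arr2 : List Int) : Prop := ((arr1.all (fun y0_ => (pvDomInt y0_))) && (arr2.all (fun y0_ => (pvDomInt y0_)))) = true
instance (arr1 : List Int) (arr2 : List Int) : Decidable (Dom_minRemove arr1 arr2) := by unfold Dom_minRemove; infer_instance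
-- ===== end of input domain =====

-- B replaces A's two frequency dictionaries and key-intersection loop with sort-then-two-pointer merge (alternative algorithm, same result).

-- ===== PORT A =====
def minRemove (arr1 : List Int) (arr2 : List Int) : Int :=
  let freq1 := arr1.foldl (fun d num =>
    if d.contains num then d.insert num (d.getD num 0 + 1) else d.insert num 1) PySem.Dict.empty
  let freq2 := arr2.foldl (fun d num =>
    if d.contains num then d.insert num (d.getD num 0 + 1) else d.insert num 1) PySem.Dict.empty
  freq1.keys.foldl (fun count num =>
    if freq2.contains num then count + min (freq1.getD num 0) (freq2.getD num 0) else count) 0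

-- ===== PORT B =====
-- two-pointer merge of the two sorted lists (the while loop over indices, as structural recursion)
def mergeCount : List Int → List Int → Int
  | [], _ => 0
  | _ :: _, [] => 0
  | a :: t1, b :: t2 =>
    if a = b then 1 + mergeCount t1 t2
    else if a < b then mergeCount t1 (b :: t2)
    else mergeCount (a :: t1) t2

def minRemove_alt (arr1 : List Int) (arr2 : List Int) : Int :=
  mergeCount (PySem.List.sorted arr1 (fun x => x) false) (PySem.List.sorted arr2 (fun x => x) false)

-- ===== PRECONDITION & SPEC =====
def Spec_minRemove (arr1 : List Int) (arr2 : List Int) (out : Int) : Prop := out = minRemove_alt arr1 arr2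
instance (arr1 : List Int) (arr2 : List Int) (out : Int) : Decidable (Spec_minRemove arr1 arr2 out) := by unfold Spec_minRemove; infer_instance

-- ===== CLAIM (what is proved, stated in full; the proofs are below) =====
def Claim_equal_minRemove : Prop := ∀ (arr1 : List Int) (arr2 : List Int), Dom_minRemove arr1 arr2 → Spec_minRemove arr1 arr2 (minRemove arr1 arr2)

-- ===== LEMMAS AND PROOFS =====

-- Both sides equal the cardinality of the multiset intersection of the two inputs.

-- A's counter loop step equals the unconditional counter step
theorem pvStepEq :
    (fun (d : PySem.Dict Int Int) num =>
      if d.contains num then d.insert num (d.getD num 0 + 1) else d.insert num 1)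
    = (fun (d : PySem.Dict Int Int) num => d.insert num (d.getD num 0 + 1)) := by
  funext d num
  by_cases h : d.contains num
  · simp [h]
  · simp only [Bool.not_eq_true] at h
    simp [h, PySem.Dict.getD_of_not_contains d (0 : Int) h]

-- A equals the sum over the distinct elements of arr1 of min of the two counts
theorem pvA_eq_sum (a1 a2 : List Int) :
    minRemove a1 a2
      = ((PySem.List.dedup a1).map
          (fun x => min ((a1.count x : Int)) ((a2.count x : Int)))).sum := by
  unfold minRemove
  rw [pvStepEq, PySem.Dict.foldl_insert_getD_add_one_eq_counter,
    PySem.Dict.foldl_insert_getD_add_one_eq_counter]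
  dsimp only
  rw [PySem.Dict.keys_counter, ← PySem.List.dedup_eq_ofList]
  have hstep : (fun (count : Int) num =>
      if (PySem.Dict.counter a2).contains num then
        count + min ((PySem.Dict.counter a1).getD num 0) ((PySem.Dict.counter a2).getD num 0)
      else count)
      = fun (count : Int) num => count + min ((a1.count num : Int)) ((a2.count num : Int)) := by
    funext c num
    rw [PySem.Dict.contains_counter, PySem.Dict.getD_counter, PySem.Dict.getD_counter]
    by_cases h : num ∈ a2
    · simp [h]
    · have h0 : a2.count num = 0 := List.count_eq_zero.mpr h
      simp [h, h0]
  rw [hstep, PySem.List.foldl_add]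
  simp

-- sums of Nat-valued maps cast to Int
theorem pvSumCast (l : List Int) (f : Int → Nat) :
    (l.map (fun x => ((f x : Nat) : Int))).sum = (((l.map f).sum : Nat) : Int) := by
  induction l with
  | nil => simp
  | cons a t ih => simp [ih]

-- the sum over distinct elements of min-counts is the card of the multiset intersection
theorem pvSum_eq_card (l1 l2 : List Int) :
    ((PySem.List.dedup l1).map
        (fun x => min ((l1.count x : Int)) ((l2.count x : Int)))).sum
      = ((Multiset.card ((↑l1 : Multiset Int) ∩ ↑l2)) : Int) := by
  have hN : ∑ x ∈ l1.toFinset, min (l1.count x) (l2.count x)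
      = Multiset.card ((↑l1 : Multiset Int) ∩ ↑l2) := by
    rw [← Multiset.toFinset_sum_count_eq ((↑l1 : Multiset Int) ∩ ↑l2)]
    rw [Finset.sum_subset (s₁ := ((↑l1 : Multiset Int) ∩ ↑l2).toFinset) (s₂ := l1.toFinset)
      (by
        intro x hx
        rw [Multiset.mem_toFinset, Multiset.mem_inter] at hx
        rw [List.mem_toFinset]
        exact Multiset.mem_coe.mp hx.1)
      (by
        intro x _ hx
        rw [Multiset.mem_toFinset] at hx
        exact Multiset.count_eq_zero_of_notMem hx)]
    apply Finset.sum_congr rfl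
    intro x _
    rw [Multiset.count_inter, Multiset.coe_count, Multiset.coe_count]
  have hdn : (PySem.List.dedup l1).Nodup := PySem.List.nodup_dedup l1
  have htf : (PySem.List.dedup l1).toFinset = l1.toFinset := by
    apply Finset.ext
    intro x
    simp
  calc ((PySem.List.dedup l1).map
          (fun x => min ((l1.count x : Int)) ((l2.count x : Int)))).sum
      = ((PySem.List.dedup l1).map
          (fun x => ((min (l1.count x) (l2.count x) : Nat) : Int))).sum := by
        apply congrArg
        apply List.map_congr_left
        intro x _
        push_cast
        rfl
    _ = ((((PySem.List.dedup l1).map (fun x => min (l1.count x) (l2.count x))).sum : Nat) : Int) :=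
        pvSumCast _ _
    _ = ((∑ x ∈ l1.toFinset, min (l1.count x) (l2.count x) : Nat) : Int) := by
        rw [← List.sum_toFinset _ hdn, htf]
    _ = _ := by rw [hN]

-- B equals card of the multiset intersection, for sorted inputs
theorem pvMerge_eq_card (n : Nat) :
    ∀ s1 s2 : List Int, s1.length + s2.length ≤ n →
    s1.Pairwise (· ≤ ·) → s2.Pairwise (· ≤ ·) →
    mergeCount s1 s2 = ((Multiset.card ((↑s1 : Multiset Int) ∩ ↑s2)) : Int) := by
  induction n with
  | zero =>
    intro s1 s2 hlen _ _
    match s1, s2 with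
    | [], [] => simp [mergeCount]
    | [], _ :: _ => simp at hlen
    | _ :: _, _ => simp at hlen
  | succ n ih =>
    intro s1 s2 hlen h1 h2
    match s1, s2 with
    | [], s2 => simp [mergeCount]
    | a :: t1, [] => simp [mergeCount]
    | a :: t1, b :: t2 =>
      simp only [List.length_cons] at hlen
      by_cases hab : a = b
      · subst hab
        have hIH := ih t1 t2 (by omega) (h1.sublist (List.sublist_cons_self a t1))
          (h2.sublist (List.sublist_cons_self a t2))
        rw [show mergeCount (a :: t1) (a :: t2) = 1 + mergeCount t1 t2 by simp [mergeCount]]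
        rw [← Multiset.cons_coe, ← Multiset.cons_coe,
          Multiset.cons_inter_of_pos _ (Multiset.mem_cons_self a _),
          Multiset.erase_cons_head, Multiset.card_cons, hIH]
        push_cast
        ring
      · by_cases hlt : a < b
        · have hnot : a ∉ (↑(b :: t2) : Multiset Int) := by
            intro hmem
            rw [Multiset.mem_coe, List.mem_cons] at hmem
            rcases hmem with h | h
            · exact hab h
            · have := (List.pairwise_cons.mp h2).1 a h
              omega
          have hIH := ih t1 (b :: t2) (by simp only [List.length_cons]; omega)
            (h1.sublist (List.sublist_cons_self a t1)) h2
          rw [show mergeCount (a :: t1) (b :: t2) = mergeCount t1 (b :: t2) by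
            simp [mergeCount, hab, hlt]]
          rw [← Multiset.cons_coe, Multiset.cons_inter_of_neg _ hnot, hIH]
        · have hba : b < a := by
            rcases lt_trichotomy a b with h | h | h
            · exact absurd h hlt
            · exact absurd h hab
            · exact h
          have hnot : b ∉ (↑(a :: t1) : Multiset Int) := by
            intro hmem
            rw [Multiset.mem_coe, List.mem_cons] at hmem
            rcases hmem with h | h
            · exact hab h.symm
            · have := (List.pairwise_cons.mp h1).1 b h
              omega
          have hIH := ih (a :: t1) t2 (by simp only [List.length_cons]; omega) h1
            (h2.sublist (List.sublist_cons_self b t2))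
          rw [show mergeCount (a :: t1) (b :: t2) = mergeCount (a :: t1) t2 by
            simp [mergeCount, hab, hlt]]
          rw [Multiset.inter_comm, ← Multiset.cons_coe,
            Multiset.cons_inter_of_neg _ hnot, Multiset.inter_comm, hIH]

-- ===== VERDICT (by name: the statement is the Claim_ definition above) =====
theorem minRemove_spec : Claim_equal_minRemove := by
  intro a1 a2 _
  unfold Spec_minRemove minRemove_alt
  rw [pvA_eq_sum, pvSum_eq_card,
    pvMerge_eq_card ((PySem.List.sorted a1 (fun x => x) false).length +
        (PySem.List.sorted a2 (fun x => x) false).length) _ _ le_rfl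
      (PySem.List.sorted_pairwise a1 (fun x => x))
      (PySem.List.sorted_pairwise a2 (fun x => x)),
    Multiset.coe_eq_coe.mpr (PySem.List.sorted_perm a1 (fun x => x) false),
    Multiset.coe_eq_coe.mpr (PySem.List.sorted_perm a2 (fun x => x) false)]
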